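-- pv_equiv track=rewrite | github.com/jakeOmega/Vic3TimelineExtended | paradox_file_parser.py | calculate_depths
-- ===== SOURCE A (Python) =====
-- def calculate_depths(tokens):
--     """
--     Calculates and assigns a depth level to each token.
--     Depth increments inside each '{' and decrements upon each '}'.
--     """
--     depths = []
--     current_depth = 0
--
--     for token in tokens:
--         if token == "}":
--             current_depth -= 1
--         depths.append(current_depth)
--         if token == "{":
--             current_depth += 1
--
--     return depths
-- ===== SOURCE B (Python) =====
-- def calculate_depths(tokens):
--     deltas = [1 if t == "{" else (-1 if t == "}" else 0) for t in tokens]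
--     cum = []
--     total = 0
--     for d in deltas:
--         total += d
--         cum.append(total)
--     return [c - 1 if t == "{" else c for t, c in zip(tokens, cum)]
-- ===== Notes on version B (the rewrite author's own statement) =====
-- stated objective: alternative
-- what changed: Replaces A's single fused stateful loop with three passes: map each token to a +1/-1/0 delta, take a running prefix sum, then adjust open-brace positions by -1 in a final zip pass.
import Mathlib
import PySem

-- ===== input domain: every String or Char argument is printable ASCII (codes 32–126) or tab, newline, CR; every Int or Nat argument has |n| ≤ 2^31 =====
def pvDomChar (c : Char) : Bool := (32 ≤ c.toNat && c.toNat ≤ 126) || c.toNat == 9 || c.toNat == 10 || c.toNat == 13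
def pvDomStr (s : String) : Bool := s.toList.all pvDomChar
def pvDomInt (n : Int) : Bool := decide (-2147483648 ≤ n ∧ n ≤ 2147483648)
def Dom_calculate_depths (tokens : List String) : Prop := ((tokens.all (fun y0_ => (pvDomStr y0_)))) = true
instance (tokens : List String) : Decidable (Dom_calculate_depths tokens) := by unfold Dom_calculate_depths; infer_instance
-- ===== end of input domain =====

-- B replaces A's single fused stateful loop with three passes (delta map, prefix sum, open-brace adjustment); alternative decomposition, same cost.


-- ===== PORT A =====
def calculate_depths (tokens : List String) : List Int :=
  (tokens.foldl (fun (st : List Int × Int) token =>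
    let cur := if token == "}" then st.2 - 1 else st.2
    let depths := st.1 ++ [cur]
    let cur2 := if token == "{" then cur + 1 else cur
    (depths, cur2)) ([], 0)).1

-- ===== PORT B =====
def pvDelta (t : String) : Int := if t == "{" then 1 else if t == "}" then -1 else 0

def pvCum (total : Int) : List Int → List Int
  | [] => []
  | d :: ds => (total + d) :: pvCum (total + d) ds

def calculate_depths_alt (tokens : List String) : List Int :=
  let deltas := tokens.map pvDelta
  let cum := pvCum 0 deltas
  (tokens.zip cum).map (fun p => if p.1 == "{" then p.2 - 1 else p.2)

-- ===== PRECONDITION & SPEC =====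
def Spec_calculate_depths (tokens : List String) (out : List Int) : Prop := out = calculate_depths_alt tokens
instance (tokens : List String) (out : List Int) : Decidable (Spec_calculate_depths tokens out) := by unfold Spec_calculate_depths; infer_instance

-- ===== CLAIM (what is proved, stated in full; the proofs are below) =====
def Claim_equal_calculate_depths : Prop := ∀ (tokens : List String), Dom_calculate_depths tokens → Spec_calculate_depths tokens (calculate_depths tokens)

-- ===== LEMMAS AND PROOFS =====

theorem pv_fold_eq (ts : List String) : ∀ (acc : List Int) (cur : Int),
    (ts.foldl (fun (st : List Int × Int) token =>
      let c := if token == "}" then st.2 - 1 else st.2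
      let depths := st.1 ++ [c]
      let c2 := if token == "{" then c + 1 else c
      (depths, c2)) (acc, cur)).1
    = acc ++ ((ts.zip (pvCum cur (ts.map pvDelta))).map
        (fun p => if p.1 == "{" then p.2 - 1 else p.2)) := by
  induction ts with
  | nil => intro acc cur; simp
  | cons t ts ih =>
    intro acc cur
    simp only [List.foldl_cons, List.map_cons, pvCum, List.zip_cons_cons, List.map]
    rw [ih]
    by_cases h1 : t = "{"
    · subst h1; simp [pvDelta]
    · by_cases h2 : t = "}"
      · subst h2; simp [pvDelta, sub_eq_add_neg]
      · simp [pvDelta, h1, h2]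

-- ===== VERDICT (by name: the statement is the Claim_ definition above) =====
theorem calculate_depths_spec : Claim_equal_calculate_depths := by
  intro tokens _
  show calculate_depths tokens = calculate_depths_alt tokens
  simpa [calculate_depths, calculate_depths_alt] using pv_fold_eq tokens [] 0
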